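-- pv_equiv track=rewrite | github.com/legendaryl713/Dynamic-Block-Cipher-Recommender-An-Adaptive-Decision-Support-System | tree.py | score_ciphers
-- ===== SOURCE A (Python) =====
-- def normalize_value(attribute, value):
--     """Normalize user input to match CSV data."""
--     mappings = {
--         "Security Level": {
--             "high": ["high", "very high"],
--             "medium": ["medium"],
--             "low": ["low"]
--         },
--         "Speed": {
--             "high": ["high"],
--             "medium": ["medium"],
--             "low": ["low"]
--         },
--         "Memory Usage": {
--             "high": ["high"],
--             "medium": ["medium"],
--             "low": ["low"]
--         },
--         "Hardware Compatibility": {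
--             "high": ["yes"],
--             "low": ["no"]
--         },
--         "Energy Efficiency": {
--             "high": ["high"],
--             "medium": ["medium"],
--             "low": ["low"]
--         }
--     }
--     if attribute in mappings and value.lower() in mappings[attribute]:
--         return mappings[attribute][value.lower()]
--     return [value.lower()]
--
-- def score_ciphers(ciphers, answers):
--     """Score ciphers based on user answers."""
--     scores = {cipher["Cipher"]: 0 for cipher in ciphers}  # Initialize scores
--
--     # Define scoring weights
--     exact_match_score = 3
--     weak_match_score = 1
--     opposite_match_score = -2
--
--     for cipher in ciphers:
--         for attribute, value in answers.items():
--             if value == "unknown":  # Skip scoring for "I don't know" answers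
--                 continue
--
--             normalized_values = normalize_value(attribute, value)
--             cipher_value = cipher[attribute].strip().lower()
--
--             if cipher_value in normalized_values:
--                 scores[cipher["Cipher"]] += exact_match_score  # Exact match
--             elif value.lower() == "high" and cipher_value == "medium":  # Weak match example
--                 scores[cipher["Cipher"]] += weak_match_score
--             elif value.lower() == "low" and cipher_value == "high":  # Opposite match example
--                 scores[cipher["Cipher"]] += opposite_match_score
--
--     return scores
-- ===== SOURCE B (Python) =====
-- def score_ciphers(ciphers, answers):
--     """Score ciphers based on user answers (table-building pass, then one lookup sum per cipher)."""
--     tables = []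
--     for attribute, value in answers.items():
--         if value == "unknown":
--             continue
--         v = value.lower()
--         if attribute == "Security Level" and v == "high":
--             targets = ["high", "very high"]
--         elif attribute == "Hardware Compatibility" and v in ("high", "low"):
--             targets = ["yes"] if v == "high" else ["no"]
--         else:
--             targets = [v]
--         table = {}
--         for t in targets:
--             table[t] = 3
--         if v == "high":
--             table.setdefault("medium", 1)
--         elif v == "low":
--             table.setdefault("high", -2)
--         tables.append((attribute, table))
--     scores = {}
--     for cipher in ciphers:
--         total = sum(t.get(cipher[a].strip().lower(), 0) for a, t in tables)
--         name = cipher["Cipher"]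
--         scores[name] = scores.get(name, 0) + total
--     return scores
-- ===== Notes on version B (the rewrite author's own statement) =====
-- stated objective: alternative
-- what changed: B builds one score-delta lookup table per (non-unknown) answer in a single pass over the answers, then scores each cipher by summing table lookups, replacing A's per-(cipher,answer) normalize+if/elif scan.
import Mathlib
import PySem

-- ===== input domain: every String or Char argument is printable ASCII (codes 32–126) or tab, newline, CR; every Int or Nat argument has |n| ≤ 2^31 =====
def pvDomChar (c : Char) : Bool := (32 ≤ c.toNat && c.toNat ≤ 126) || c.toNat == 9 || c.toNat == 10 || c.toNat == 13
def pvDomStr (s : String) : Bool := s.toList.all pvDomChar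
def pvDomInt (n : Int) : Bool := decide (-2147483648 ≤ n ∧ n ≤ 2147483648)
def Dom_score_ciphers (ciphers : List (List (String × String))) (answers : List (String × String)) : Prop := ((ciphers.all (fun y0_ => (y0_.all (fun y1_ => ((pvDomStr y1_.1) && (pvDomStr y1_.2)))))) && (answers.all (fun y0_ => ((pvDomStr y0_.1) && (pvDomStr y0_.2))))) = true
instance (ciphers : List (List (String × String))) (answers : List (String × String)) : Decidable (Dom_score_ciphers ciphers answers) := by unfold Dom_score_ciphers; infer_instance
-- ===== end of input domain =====

-- B replaces A's per-(cipher,answer) if/elif scanning by one pass over the answers that precomputes a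
-- score-delta lookup table per answer, then a single table-lookup sum per cipher (objective: alternative).

-- ===== PORT A =====
def normalize_value (attr value : String) : List String :=
  let mappings : PySem.Dict String (PySem.Dict String (List String)) :=
    PySem.Dict.ofList
      [("Security Level", PySem.Dict.ofList [("high", ["high", "very high"]), ("medium", ["medium"]), ("low", ["low"])]),
       ("Speed", PySem.Dict.ofList [("high", ["high"]), ("medium", ["medium"]), ("low", ["low"])]),
       ("Memory Usage", PySem.Dict.ofList [("high", ["high"]), ("medium", ["medium"]), ("low", ["low"])]),
       ("Hardware Compatibility", PySem.Dict.ofList [("high", ["yes"]), ("low", ["no"])]),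
       ("Energy Efficiency", PySem.Dict.ofList [("high", ["high"]), ("medium", ["medium"]), ("low", ["low"])])]
  if mappings.contains attr && (mappings.getD attr PySem.Dict.empty).contains (PySem.Str.lower value) then
    (mappings.getD attr PySem.Dict.empty).getD (PySem.Str.lower value) []
  else [PySem.Str.lower value]

def score_ciphers (ciphers : List (List (String × String))) (answers : List (String × String)) : List (String × Int) :=
  let scores0 := ciphers.foldl (fun d c => d.insert ((PySem.Dict.ofList c).getD "Cipher" "") 0)
      (PySem.Dict.empty : PySem.Dict String Int)
  (ciphers.foldl (fun sc c =>
      (PySem.Dict.ofList answers).items.foldl (fun sc p =>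
        if p.2 == "unknown" then sc
        else
          if (normalize_value p.1 p.2).contains (PySem.Str.lower (PySem.Str.strip ((PySem.Dict.ofList c).getD p.1 ""))) then
            sc.modify ((PySem.Dict.ofList c).getD "Cipher" "") 0 (· + 3)
          else if PySem.Str.lower p.2 == "high" && PySem.Str.lower (PySem.Str.strip ((PySem.Dict.ofList c).getD p.1 "")) == "medium" then
            sc.modify ((PySem.Dict.ofList c).getD "Cipher" "") 0 (· + 1)
          else if PySem.Str.lower p.2 == "low" && PySem.Str.lower (PySem.Str.strip ((PySem.Dict.ofList c).getD p.1 "")) == "high" then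
            sc.modify ((PySem.Dict.ofList c).getD "Cipher" "") 0 (· + (-2))
          else sc) sc) scores0).items

-- ===== PORT B =====
def pvTargets (attr v : String) : List String :=
  if attr == "Security Level" && v == "high" then ["high", "very high"]
  else if attr == "Hardware Compatibility" && (v == "high" || v == "low") then
    (if v == "high" then ["yes"] else ["no"])
  else [v]

def pvMkTable (attr value : String) : PySem.Dict String Int :=
  let v := PySem.Str.lower value
  let t := (pvTargets attr v).foldl (fun t s => t.insert s 3) (PySem.Dict.empty : PySem.Dict String Int)
  if v == "high" then t.setdefault "medium" 1
  else if v == "low" then t.setdefault "high" (-2)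
  else t

def score_ciphers_alt (ciphers : List (List (String × String))) (answers : List (String × String)) : List (String × Int) :=
  let tables := (PySem.Dict.ofList answers).items.foldl
      (fun acc p => if p.2 == "unknown" then acc else acc ++ [(p.1, pvMkTable p.1 p.2)])
      ([] : List (String × PySem.Dict String Int))
  (ciphers.foldl (fun sc c =>
      sc.insert ((PySem.Dict.ofList c).getD "Cipher" "")
        (sc.getD ((PySem.Dict.ofList c).getD "Cipher" "") 0 +
          tables.foldl (fun s at_ => s + at_.2.getD (PySem.Str.lower (PySem.Str.strip ((PySem.Dict.ofList c).getD at_.1 ""))) 0) 0))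
    (PySem.Dict.empty : PySem.Dict String Int)).items

-- ===== PRECONDITION & SPEC =====
-- Pre_ excludes exactly the inputs where Python A raises KeyError: a cipher dict lacking the "Cipher"
-- key, or lacking the key of a (non-"unknown") answer.
def Pre_score_ciphers (ciphers : List (List (String × String))) (answers : List (String × String)) : Prop :=
  ∀ c ∈ ciphers, "Cipher" ∈ c.map Prod.fst ∧
    ∀ p ∈ (PySem.Dict.ofList answers).items, p.2 ≠ "unknown" → p.1 ∈ c.map Prod.fst
instance (ciphers : List (List (String × String))) (answers : List (String × String)) : Decidable (Pre_score_ciphers ciphers answers) := by unfold Pre_score_ciphers; infer_instance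

def pvWitness_score_ciphers : (List (List (String × String))) × (List (String × String)) :=
  ([[("Cipher", "AES"), ("Speed", "high")]], [("Speed", "High")])

def Spec_score_ciphers (ciphers : List (List (String × String))) (answers : List (String × String)) (out : List (String × Int)) : Prop := out = score_ciphers_alt ciphers answers
instance (ciphers : List (List (String × String))) (answers : List (String × String)) (out : List (String × Int)) : Decidable (Spec_score_ciphers ciphers answers out) := by unfold Spec_score_ciphers; infer_instance

-- ===== CLAIM (what is proved, stated in full; the proofs are below) =====
def Claim_equal_score_ciphers : Prop := ∀ (ciphers : List (List (String × String))) (answers : List (String × String)), Dom_score_ciphers ciphers answers → Pre_score_ciphers ciphers answers → Spec_score_ciphers ciphers answers (score_ciphers ciphers answers)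

-- ===== LEMMAS AND PROOFS =====

def pvName (c : List (String × String)) : String := (PySem.Dict.ofList c).getD "Cipher" ""
def pvCv (c : List (String × String)) (a : String) : String :=
  PySem.Str.lower (PySem.Str.strip ((PySem.Dict.ofList c).getD a ""))
def pvDelta (c : List (String × String)) (p : String × String) : Int :=
  if (normalize_value p.1 p.2).contains (pvCv c p.1) then 3
  else if PySem.Str.lower p.2 == "high" && pvCv c p.1 == "medium" then 1
  else if PySem.Str.lower p.2 == "low" && pvCv c p.1 == "high" then -2
  else 0
def pvTot (c : List (String × String)) (ans : List (String × String)) : Int :=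
  ((ans.filter (fun p => !(p.2 == "unknown"))).map (pvDelta c)).sum

theorem pv_norm_eq (a v : String) : normalize_value a v = pvTargets a (PySem.Str.lower v) := by
  unfold normalize_value pvTargets
  rw [show (PySem.Dict.ofList
      [("Security Level", PySem.Dict.ofList [("high", ["high", "very high"]), ("medium", ["medium"]), ("low", ["low"])]),
       ("Speed", PySem.Dict.ofList [("high", ["high"]), ("medium", ["medium"]), ("low", ["low"])]),
       ("Memory Usage", PySem.Dict.ofList [("high", ["high"]), ("medium", ["medium"]), ("low", ["low"])]),
       ("Hardware Compatibility", PySem.Dict.ofList [("high", ["yes"]), ("low", ["no"])]),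
       ("Energy Efficiency", PySem.Dict.ofList [("high", ["high"]), ("medium", ["medium"]), ("low", ["low"])])] : PySem.Dict String (PySem.Dict String (List String)))
  = PySem.Dict.mk
      [("Security Level", PySem.Dict.mk [("high", ["high", "very high"]), ("medium", ["medium"]), ("low", ["low"])]),
       ("Speed", PySem.Dict.mk [("high", ["high"]), ("medium", ["medium"]), ("low", ["low"])]),
       ("Memory Usage", PySem.Dict.mk [("high", ["high"]), ("medium", ["medium"]), ("low", ["low"])]),
       ("Hardware Compatibility", PySem.Dict.mk [("high", ["yes"]), ("low", ["no"])]),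
       ("Energy Efficiency", PySem.Dict.mk [("high", ["high"]), ("medium", ["medium"]), ("low", ["low"])])] from by decide]
  by_cases h1 : a = "Security Level" <;> by_cases h2 : a = "Speed" <;> by_cases h3 : a = "Memory Usage" <;>
    by_cases h4 : a = "Hardware Compatibility" <;> by_cases h5 : a = "Energy Efficiency" <;>
    simp_all [PySem.Dict.contains_mk, PySem.Dict.getD_eq_get?_getD, PySem.Dict.get?_mk_cons] <;>
  by_cases g1 : PySem.Str.lower v = "high" <;> by_cases g2 : PySem.Str.lower v = "medium" <;>
    by_cases g3 : PySem.Str.lower v = "low" <;> (try simp_all) <;>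
    (try (rintro (h|h|h|h|h) <;> simp_all)) <;> (try (rintro (h|h|h) <;> simp_all)) <;>
    (try (rintro (h|h) <;> simp_all))

theorem pv_getD_fold3 (l : List String) (t : PySem.Dict String Int) (cv : String) :
    ((l.foldl (fun t s => t.insert s 3) t).getD cv 0) = if l.contains cv then 3 else t.getD cv 0 := by
  induction l generalizing t with
  | nil => simp
  | cons x xs ih =>
    simp only [List.foldl_cons, ih, List.contains_cons, PySem.Dict.getD_insert]
    by_cases hx : cv = x <;> by_cases hm : xs.contains cv <;> simp_all

theorem pv_contains_fold3 (l : List String) (t : PySem.Dict String Int) (cv : String) :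
    ((l.foldl (fun t s => t.insert s 3) t).contains cv) = (l.contains cv || t.contains cv) := by
  induction l generalizing t with
  | nil => simp
  | cons x xs ih =>
    simp only [List.foldl_cons, ih, List.contains_cons, PySem.Dict.contains_insert]
    by_cases hx : cv = x <;> by_cases hm : xs.contains cv <;> simp_all

theorem pv_table_getD (a v cv : String) :
    (pvMkTable a v).getD cv 0 =
      (if (pvTargets a (PySem.Str.lower v)).contains cv then 3
       else if PySem.Str.lower v == "high" && cv == "medium" then 1
       else if PySem.Str.lower v == "low" && cv == "high" then -2
       else 0) := by
  unfold pvMkTable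
  simp only []
  by_cases hv : PySem.Str.lower v = "high" <;> by_cases hl : PySem.Str.lower v = "low" <;> simp_all
  · by_cases hc : ((pvTargets a "high").foldl (fun t s => t.insert s 3) (PySem.Dict.empty : PySem.Dict String Int)).contains "medium"
    · rw [PySem.Dict.setdefault_of_contains _ _ hc, pv_getD_fold3]
      rw [pv_contains_fold3] at hc
      simp at hc
      by_cases h1 : (pvTargets a "high").contains cv <;> by_cases h2 : cv = "medium" <;> simp_all
    · rw [PySem.Dict.setdefault_of_not_contains _ _ (by simpa using hc)]
      rw [pv_contains_fold3] at hc
      simp at hc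
      rw [PySem.Dict.getD_insert]
      by_cases h2 : cv = "medium" <;> simp_all [pv_getD_fold3]
  · by_cases hc : ((pvTargets a "low").foldl (fun t s => t.insert s 3) (PySem.Dict.empty : PySem.Dict String Int)).contains "high"
    · rw [PySem.Dict.setdefault_of_contains _ _ hc, pv_getD_fold3]
      rw [pv_contains_fold3] at hc
      simp at hc
      by_cases h1 : (pvTargets a "low").contains cv <;> by_cases h2 : cv = "high" <;> simp_all
    · rw [PySem.Dict.setdefault_of_not_contains _ _ (by simpa using hc)]
      rw [pv_contains_fold3] at hc
      simp at hc
      rw [PySem.Dict.getD_insert]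
      by_cases h2 : cv = "high" <;> simp_all [pv_getD_fold3]
  · rw [pv_getD_fold3]
    by_cases h1 : (pvTargets a (PySem.Str.lower v)).contains cv <;> simp_all

-- B's table lookup equals A's per-answer branch value.
theorem pv_delta_eq_table (c : List (String × String)) (p : String × String) :
    (pvMkTable p.1 p.2).getD (pvCv c p.1) 0 = pvDelta c p := by
  rw [pv_table_getD, pvDelta, pv_norm_eq]

-- B's tables-building loop is a filter+map.
theorem pv_tables_eq (ans : List (String × String)) (acc : List (String × PySem.Dict String Int)) :
    ans.foldl (fun acc p => if p.2 == "unknown" then acc else acc ++ [(p.1, pvMkTable p.1 p.2)]) acc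
      = acc ++ (ans.filter (fun p => !(p.2 == "unknown"))).map (fun p => (p.1, pvMkTable p.1 p.2)) := by
  induction ans generalizing acc with
  | nil => simp
  | cons p ps ih =>
    simp only [List.foldl_cons]
    by_cases h : p.2 = "unknown"
    · rw [if_pos (by simp [h]), ih]
      simp [h]
    · rw [if_neg (by simp [h]), ih]
      simp [h]

-- B's per-cipher summation loop.
theorem pv_sum_fold (tb : List (String × PySem.Dict String Int)) (c : List (String × String)) (s : Int) :
    tb.foldl (fun s at_ => s + at_.2.getD (PySem.Str.lower (PySem.Str.strip ((PySem.Dict.ofList c).getD at_.1 ""))) 0) s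
      = s + (tb.map (fun at_ => at_.2.getD (pvCv c at_.1) 0)).sum := by
  induction tb generalizing s with
  | nil => simp
  | cons x xs ih => simp [ih, pvCv]; ring

theorem pv_keys_modify_mem (c : List (String × String)) (sc : PySem.Dict String Int) (k : Int → Int)
    (h : pvName c ∈ sc.keys) :
    (sc.modify ((PySem.Dict.ofList c).getD "Cipher" "") 0 k).keys = sc.keys := by
  rw [PySem.Dict.keys_modify]
  exact PySem.Dict.keys_insert_of_contains _ _ ((PySem.Dict.contains_iff_mem_keys _ _).2 h)

-- A's inner (answers) loop: it only touches the key pvName c, adding pvTot.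
theorem pv_inner_getD (ans : List (String × String)) (c : List (String × String))
    (sc : PySem.Dict String Int) (n : String) :
    ((ans.foldl (fun sc p =>
        if p.2 == "unknown" then sc
        else
          if (normalize_value p.1 p.2).contains (PySem.Str.lower (PySem.Str.strip ((PySem.Dict.ofList c).getD p.1 ""))) then
            sc.modify ((PySem.Dict.ofList c).getD "Cipher" "") 0 (· + 3)
          else if PySem.Str.lower p.2 == "high" && PySem.Str.lower (PySem.Str.strip ((PySem.Dict.ofList c).getD p.1 "")) == "medium" then
            sc.modify ((PySem.Dict.ofList c).getD "Cipher" "") 0 (· + 1)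
          else if PySem.Str.lower p.2 == "low" && PySem.Str.lower (PySem.Str.strip ((PySem.Dict.ofList c).getD p.1 "")) == "high" then
            sc.modify ((PySem.Dict.ofList c).getD "Cipher" "") 0 (· + (-2))
          else sc) sc).getD n 0)
      = sc.getD n 0 + (if pvName c = n then pvTot c ans else 0) := by
  induction ans generalizing sc with
  | nil => simp [pvTot]
  | cons p ps ih =>
    simp only [List.foldl_cons]
    by_cases h0 : p.2 = "unknown"
    · rw [if_pos (by simp [h0]), ih]
      simp [pvTot, h0]
    · rw [if_neg (by simp [h0])]
      have htot : pvTot c (p :: ps) = pvDelta c p + pvTot c ps := by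
        simp [pvTot, h0]
      by_cases h1 : (normalize_value p.1 p.2).contains (pvCv c p.1)
      · rw [if_pos (by simpa [pvCv] using h1)]
        have hd : pvDelta c p = 3 := by simp only [pvDelta]; rw [if_pos h1]
        rw [ih, PySem.Dict.getD_modify, htot, hd]
        simp only [show (PySem.Dict.ofList c).getD "Cipher" "" = pvName c from rfl]
        by_cases hn : pvName c = n
        · subst hn; simp; try ring
        · rw [if_neg (fun h => hn h.symm), if_neg hn, if_neg hn]
      · rw [if_neg (by simpa [pvCv] using h1)]
        by_cases h2 : PySem.Str.lower p.2 = "high" ∧ pvCv c p.1 = "medium"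
        · rw [if_pos (by simp only [Bool.and_eq_true, beq_iff_eq]; exact ⟨h2.1, h2.2⟩)]
          have hd : pvDelta c p = 1 := by
            simp only [pvDelta]
            rw [if_neg h1, if_pos (by simp only [Bool.and_eq_true, beq_iff_eq]; exact ⟨h2.1, h2.2⟩)]
          rw [ih, PySem.Dict.getD_modify, htot, hd]
          simp only [show (PySem.Dict.ofList c).getD "Cipher" "" = pvName c from rfl]
          by_cases hn : pvName c = n
          · subst hn; simp; try ring
          · rw [if_neg (fun h => hn h.symm), if_neg hn, if_neg hn]
        · rw [if_neg (by simp only [Bool.and_eq_true, beq_iff_eq]; exact fun hc => h2 ⟨hc.1, hc.2⟩)]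
          by_cases h3 : PySem.Str.lower p.2 = "low" ∧ pvCv c p.1 = "high"
          · rw [if_pos (by simp only [Bool.and_eq_true, beq_iff_eq]; exact ⟨h3.1, h3.2⟩)]
            have hd : pvDelta c p = -2 := by
              simp only [pvDelta]
              rw [if_neg h1, if_neg (by simp only [Bool.and_eq_true, beq_iff_eq]; exact fun hc => h2 ⟨hc.1, hc.2⟩), if_pos (by simp only [Bool.and_eq_true, beq_iff_eq]; exact ⟨h3.1, h3.2⟩)]
            rw [ih, PySem.Dict.getD_modify, htot, hd]
            simp only [show (PySem.Dict.ofList c).getD "Cipher" "" = pvName c from rfl]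
            by_cases hn : pvName c = n
            · subst hn; simp; try ring
            · rw [if_neg (fun h => hn h.symm), if_neg hn, if_neg hn]
          · rw [if_neg (by simp only [Bool.and_eq_true, beq_iff_eq]; exact fun hc => h3 ⟨hc.1, hc.2⟩)]
            have hd : pvDelta c p = 0 := by
              simp only [pvDelta]
              rw [if_neg h1, if_neg (by simp only [Bool.and_eq_true, beq_iff_eq]; exact fun hc => h2 ⟨hc.1, hc.2⟩), if_neg (by simp only [Bool.and_eq_true, beq_iff_eq]; exact fun hc => h3 ⟨hc.1, hc.2⟩)]
            rw [ih, htot, hd]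
            simp

-- A's outer loop on getD.
theorem pv_outer_getD_A (cs : List (List (String × String))) (ans : List (String × String))
    (sc : PySem.Dict String Int) (n : String) :
    ((cs.foldl (fun sc c =>
        ans.foldl (fun sc p =>
          if p.2 == "unknown" then sc
          else
            if (normalize_value p.1 p.2).contains (PySem.Str.lower (PySem.Str.strip ((PySem.Dict.ofList c).getD p.1 ""))) then
              sc.modify ((PySem.Dict.ofList c).getD "Cipher" "") 0 (· + 3)
            else if PySem.Str.lower p.2 == "high" && PySem.Str.lower (PySem.Str.strip ((PySem.Dict.ofList c).getD p.1 "")) == "medium" then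
              sc.modify ((PySem.Dict.ofList c).getD "Cipher" "") 0 (· + 1)
            else if PySem.Str.lower p.2 == "low" && PySem.Str.lower (PySem.Str.strip ((PySem.Dict.ofList c).getD p.1 "")) == "high" then
              sc.modify ((PySem.Dict.ofList c).getD "Cipher" "") 0 (· + (-2))
            else sc) sc) sc).getD n 0)
      = sc.getD n 0 + ((cs.filter (fun c => pvName c == n)).map (fun c => pvTot c ans)).sum := by
  induction cs generalizing sc with
  | nil => simp
  | cons c cs ih =>
    simp only [List.foldl_cons, List.filter_cons]
    rw [ih, pv_inner_getD]
    by_cases hn : pvName c = n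
    · rw [if_pos hn, if_pos (by simpa using hn)]
      simp only [List.map_cons, List.sum_cons]
      ring
    · rw [if_neg hn, if_neg (by simpa using hn)]
      simp

-- B's outer loop on getD.
theorem pv_outer_getD_B (cs : List (List (String × String)))
    (key : List (String × String) → String) (f : List (String × String) → Int)
    (sc : PySem.Dict String Int) (n : String) :
    ((cs.foldl (fun sc c => sc.insert (key c) (sc.getD (key c) 0 + f c)) sc).getD n 0)
      = sc.getD n 0 + ((cs.filter (fun c => key c == n)).map f).sum := by
  induction cs generalizing sc with
  | nil => simp
  | cons c cs ih =>
    simp only [List.foldl_cons, List.filter_cons]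
    rw [ih, PySem.Dict.getD_insert]
    by_cases hn : key c = n
    · rw [if_pos hn.symm, if_pos (by simpa using hn)]
      simp only [List.map_cons, List.sum_cons]
      rw [hn]; ring
    · rw [if_neg (fun h => hn h.symm), if_neg (by simpa using hn)]

-- A's zero-initialisation keeps getD _ 0 at 0.
theorem pv_init_getD (cs : List (List (String × String))) (d : PySem.Dict String Int) (n : String)
    (h : d.getD n 0 = 0) :
    ((cs.foldl (fun d c => d.insert ((PySem.Dict.ofList c).getD "Cipher" "") 0) d).getD n 0) = 0 := by
  induction cs generalizing d with
  | nil => simpa using h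
  | cons c cs ih =>
    simp only [List.foldl_cons]
    exact ih _ (by rw [PySem.Dict.getD_insert]; split_ifs <;> simp [h])

-- A's inner loop keeps the key list unchanged when the touched key is present.
theorem pv_inner_keys (ans : List (String × String)) (c : List (String × String))
    (sc : PySem.Dict String Int) (h : pvName c ∈ sc.keys) :
    ((ans.foldl (fun sc p =>
        if p.2 == "unknown" then sc
        else
          if (normalize_value p.1 p.2).contains (PySem.Str.lower (PySem.Str.strip ((PySem.Dict.ofList c).getD p.1 ""))) then
            sc.modify ((PySem.Dict.ofList c).getD "Cipher" "") 0 (· + 3)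
          else if PySem.Str.lower p.2 == "high" && PySem.Str.lower (PySem.Str.strip ((PySem.Dict.ofList c).getD p.1 "")) == "medium" then
            sc.modify ((PySem.Dict.ofList c).getD "Cipher" "") 0 (· + 1)
          else if PySem.Str.lower p.2 == "low" && PySem.Str.lower (PySem.Str.strip ((PySem.Dict.ofList c).getD p.1 "")) == "high" then
            sc.modify ((PySem.Dict.ofList c).getD "Cipher" "") 0 (· + (-2))
          else sc) sc).keys) = sc.keys := by
  induction ans generalizing sc with
  | nil => simp
  | cons p ps ih =>
    simp only [List.foldl_cons]
    split_ifs with w1 w2 w3 w4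
    · exact ih sc h
    · rw [ih _ (by rw [pv_keys_modify_mem c _ _ h]; exact h), pv_keys_modify_mem c _ _ h]
    · rw [ih _ (by rw [pv_keys_modify_mem c _ _ h]; exact h), pv_keys_modify_mem c _ _ h]
    · rw [ih _ (by rw [pv_keys_modify_mem c _ _ h]; exact h), pv_keys_modify_mem c _ _ h]
    · exact ih sc h

-- A's outer loop keeps the key list unchanged when all names are present.
theorem pv_outer_keys (cs : List (List (String × String))) (ans : List (String × String))
    (sc : PySem.Dict String Int) (h : ∀ c ∈ cs, pvName c ∈ sc.keys) :
    ((cs.foldl (fun sc c =>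
        ans.foldl (fun sc p =>
          if p.2 == "unknown" then sc
          else
            if (normalize_value p.1 p.2).contains (PySem.Str.lower (PySem.Str.strip ((PySem.Dict.ofList c).getD p.1 ""))) then
              sc.modify ((PySem.Dict.ofList c).getD "Cipher" "") 0 (· + 3)
            else if PySem.Str.lower p.2 == "high" && PySem.Str.lower (PySem.Str.strip ((PySem.Dict.ofList c).getD p.1 "")) == "medium" then
              sc.modify ((PySem.Dict.ofList c).getD "Cipher" "") 0 (· + 1)
            else if PySem.Str.lower p.2 == "low" && PySem.Str.lower (PySem.Str.strip ((PySem.Dict.ofList c).getD p.1 "")) == "high" then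
              sc.modify ((PySem.Dict.ofList c).getD "Cipher" "") 0 (· + (-2))
            else sc) sc) sc).keys) = sc.keys := by
  induction cs generalizing sc with
  | nil => simp
  | cons c cs ih =>
    simp only [List.foldl_cons]
    rw [ih, pv_inner_keys _ _ _ (h c (by simp))]
    intro c' hc'
    rw [pv_inner_keys _ _ _ (h c (by simp))]
    exact h c' (by simp [hc'])

-- B's per-cipher total equals A's per-cipher total.
theorem pv_tot_eq (c : List (String × String)) (ans : List (String × String)) :
    (((ans.filter (fun p => !(p.2 == "unknown"))).map (fun p => (p.1, pvMkTable p.1 p.2))).foldl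
        (fun s at_ => s + at_.2.getD (PySem.Str.lower (PySem.Str.strip ((PySem.Dict.ofList c).getD at_.1 ""))) 0) 0)
      = pvTot c ans := by
  rw [pv_sum_fold]
  simp only [List.map_map, pvTot, zero_add]
  congr 1
  apply List.map_congr_left
  intro p _
  exact pv_delta_eq_table c p

-- ===== VERDICT (by name: the statement is the Claim_ definition above) =====
theorem score_ciphers_spec : Claim_equal_score_ciphers := by
  intro ciphers answers _ _
  unfold Spec_score_ciphers score_ciphers score_ciphers_alt
  simp only []
  rw [pv_tables_eq, List.nil_append]
  have hkey0 : (ciphers.foldl (fun d c => d.insert ((PySem.Dict.ofList c).getD "Cipher" "") 0)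
        (PySem.Dict.empty : PySem.Dict String Int)).keys
      = PySem.Set.ofList (ciphers.map (fun c => (PySem.Dict.ofList c).getD "Cipher" "")) := by
    rw [PySem.Dict.keys_foldl_insert_key ciphers
      (fun c => (PySem.Dict.ofList c).getD "Cipher" "") (fun _ _ => (0 : Int)) PySem.Dict.empty]
    simp [PySem.Set.update_nil_left]
  have hmem0 : ∀ c ∈ ciphers,
      pvName c ∈ (ciphers.foldl (fun d c => d.insert ((PySem.Dict.ofList c).getD "Cipher" "") 0)
        (PySem.Dict.empty : PySem.Dict String Int)).keys := by
    intro c hc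
    rw [hkey0]
    have : pvName c ∈ ciphers.map (fun c => (PySem.Dict.ofList c).getD "Cipher" "") :=
      List.mem_map.2 ⟨c, hc, rfl⟩
    simpa [PySem.Set.mem_ofList] using this
  have hkeysA : (ciphers.foldl (fun sc c =>
        (PySem.Dict.ofList answers).items.foldl (fun sc p =>
          if p.2 == "unknown" then sc
          else
            if (normalize_value p.1 p.2).contains (PySem.Str.lower (PySem.Str.strip ((PySem.Dict.ofList c).getD p.1 ""))) then
              sc.modify ((PySem.Dict.ofList c).getD "Cipher" "") 0 (· + 3)
            else if PySem.Str.lower p.2 == "high" && PySem.Str.lower (PySem.Str.strip ((PySem.Dict.ofList c).getD p.1 "")) == "medium" then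
              sc.modify ((PySem.Dict.ofList c).getD "Cipher" "") 0 (· + 1)
            else if PySem.Str.lower p.2 == "low" && PySem.Str.lower (PySem.Str.strip ((PySem.Dict.ofList c).getD p.1 "")) == "high" then
              sc.modify ((PySem.Dict.ofList c).getD "Cipher" "") 0 (· + (-2))
            else sc) sc)
        (ciphers.foldl (fun d c => d.insert ((PySem.Dict.ofList c).getD "Cipher" "") 0)
          (PySem.Dict.empty : PySem.Dict String Int))).keys
      = PySem.Set.ofList (ciphers.map (fun c => (PySem.Dict.ofList c).getD "Cipher" "")) := by
    rw [pv_outer_keys _ _ _ hmem0, hkey0]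
  have hkeysB : (ciphers.foldl (fun sc c =>
        sc.insert ((PySem.Dict.ofList c).getD "Cipher" "")
          (sc.getD ((PySem.Dict.ofList c).getD "Cipher" "") 0 +
            (((PySem.Dict.ofList answers).items.filter (fun p => !(p.2 == "unknown"))).map (fun p => (p.1, pvMkTable p.1 p.2))).foldl
              (fun s at_ => s + at_.2.getD (PySem.Str.lower (PySem.Str.strip ((PySem.Dict.ofList c).getD at_.1 ""))) 0) 0))
        (PySem.Dict.empty : PySem.Dict String Int)).keys
      = PySem.Set.ofList (ciphers.map (fun c => (PySem.Dict.ofList c).getD "Cipher" "")) := by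
    rw [PySem.Dict.keys_foldl_insert_key ciphers
      (fun c => (PySem.Dict.ofList c).getD "Cipher" "")
      (fun sc c => sc.getD ((PySem.Dict.ofList c).getD "Cipher" "") 0 +
        (((PySem.Dict.ofList answers).items.filter (fun p => !(p.2 == "unknown"))).map (fun p => (p.1, pvMkTable p.1 p.2))).foldl
          (fun s at_ => s + at_.2.getD (PySem.Str.lower (PySem.Str.strip ((PySem.Dict.ofList c).getD at_.1 ""))) 0) 0)
      PySem.Dict.empty]
    simp [PySem.Set.update_nil_left]
  rw [PySem.Dict.items_eq_map_keys _ (by rw [hkeysA]; exact PySem.Set.nodup_ofList _) (0 : Int),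
    PySem.Dict.items_eq_map_keys _ (by rw [hkeysB]; exact PySem.Set.nodup_ofList _) (0 : Int),
    hkeysA, hkeysB]
  apply List.map_congr_left
  intro n _
  refine Prod.ext rfl ?_
  show _ = _
  rw [pv_outer_getD_A, pv_outer_getD_B ciphers
      (fun c => (PySem.Dict.ofList c).getD "Cipher" "")
      (fun c => (((PySem.Dict.ofList answers).items.filter (fun p => !(p.2 == "unknown"))).map (fun p => (p.1, pvMkTable p.1 p.2))).foldl
        (fun s at_ => s + at_.2.getD (PySem.Str.lower (PySem.Str.strip ((PySem.Dict.ofList c).getD at_.1 ""))) 0) 0),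
    pv_init_getD ciphers PySem.Dict.empty n (by simp)]
  simp only [PySem.Dict.getD_empty, zero_add, pvName]
  congr 1
  apply List.map_congr_left
  intro c _
  exact (pv_tot_eq c _).symm
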